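-- pv_equiv track=rewrite | github.com/d11216142/cpe-generator | db_config.py | is_localhost
-- ===== SOURCE A (Python) =====
-- ALLOWED_LOCALHOST_NAMES = [
--     'localhost',
--     '127.0.0.1',
--     '::1',
--     '(local)',
--     '.',
--     'localhost\\SQLEXPRESS',  # SQL Server Express 具名執行個體
--     '(localdb)\\mssqllocaldb'  # LocalDB 執行個體
-- ]
--
-- def is_localhost(server):
--     """
--     檢查伺服器位址是否為本地主機
--
--     Args:
--         server: 伺服器位址字串
--
--     Returns:
--         bool: 如果是本地主機返回 True，否則返回 False
--     """
--     if not server: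
--         return False
--
--     # 將伺服器名稱轉換為小寫進行比較
--     server_lower = server.lower().strip()
--
--     # 檢查是否在允許的本地主機名稱列表中
--     for allowed in ALLOWED_LOCALHOST_NAMES:
--         if server_lower == allowed.lower() or server_lower.startswith(allowed.lower() + '\\'):
--             return True
--
--     return False
-- ===== SOURCE B (Python) =====
-- ALLOWED_LOCALHOST_NAMES = [
--     'localhost',
--     '127.0.0.1',
--     '::1',
--     '(local)',
--     '.',
--     'localhost\\SQLEXPRESS',
--     '(localdb)\\mssqllocaldb'
-- ]
--
-- NAMES = {n.lower() for n in ALLOWED_LOCALHOST_NAMES}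
--
--
-- def is_localhost(server):
--     if not server:
--         return False
--     server_lower = server.lower().strip()
--     if server_lower in NAMES:
--         return True
--     for i in range(len(server_lower)):
--         if server_lower[i] == '\\' and server_lower[:i] in NAMES:
--             return True
--     return False
-- ===== Notes on version B (the rewrite author's own statement) =====
-- stated objective: alternative
-- what changed: A scans the allowed-name list testing equal-or-startswith per name; B builds a lowered name set once, does one membership test, then scans the server string's backslash positions checking each prefix against the set.
import Mathlib
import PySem

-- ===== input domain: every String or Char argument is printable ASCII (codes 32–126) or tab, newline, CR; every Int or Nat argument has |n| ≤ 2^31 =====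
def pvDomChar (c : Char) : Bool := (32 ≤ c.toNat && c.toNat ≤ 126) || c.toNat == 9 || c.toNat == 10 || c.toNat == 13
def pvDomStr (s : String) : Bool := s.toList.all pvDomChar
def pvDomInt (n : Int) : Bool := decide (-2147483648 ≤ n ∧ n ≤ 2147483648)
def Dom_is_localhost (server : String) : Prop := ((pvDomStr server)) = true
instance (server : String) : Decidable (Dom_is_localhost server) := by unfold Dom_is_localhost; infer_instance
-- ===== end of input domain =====

-- B replaces A's scan of the allowed-name list (equal-or-startswith per name) by one
-- membership test plus a scan over the server's backslash positions against a prefix set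
-- built once from the allowed names (objective: alternative decomposition).

-- ===== PORT A =====
-- module constant ALLOWED_LOCALHOST_NAMES
def allowedLocalhostNames : List String :=
  ["localhost", "127.0.0.1", "::1", "(local)", ".",
   "localhost\\SQLEXPRESS", "(localdb)\\mssqllocaldb"]

def is_localhost (server : String) : Bool :=
  if server = "" then false
  else
    let serverLower := PySem.Chars.strip (PySem.Chars.lower server.toList)
    -- for allowed in ALLOWED_LOCALHOST_NAMES: early return = List.any
    allowedLocalhostNames.any (fun allowed =>
      let al := PySem.Chars.lower allowed.toList
      serverLower == al || PySem.Chars.startswith serverLower (al ++ ['\\']))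

-- ===== PORT B =====
-- NAMES = {n.lower() for n in ALLOWED_LOCALHOST_NAMES}
def localhostNameSet : PySem.Set (List Char) :=
  PySem.Set.ofList (allowedLocalhostNames.map (fun n => PySem.Chars.lower n.toList))

def is_localhost_alt (server : String) : Bool :=
  if server = "" then false
  else
    let serverLower := PySem.Chars.strip (PySem.Chars.lower server.toList)
    if PySem.Set.contains localhostNameSet serverLower then true
    else
      -- for i in range(len(server_lower)): sl[i] == '\\' and sl[:i] in NAMES
      (List.range serverLower.length).any (fun i =>
        serverLower.getD i ' ' == '\\' &&
          PySem.Set.contains localhostNameSet (serverLower.take i))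

-- ===== PRECONDITION & SPEC =====
def Spec_is_localhost (server : String) (out : Bool) : Prop := out = is_localhost_alt server
instance (server : String) (out : Bool) : Decidable (Spec_is_localhost server out) := by unfold Spec_is_localhost; infer_instance

-- ===== CLAIM (what is proved, stated in full; the proofs are below) =====
def Claim_equal_is_localhost : Prop := ∀ (server : String), Dom_is_localhost server → Spec_is_localhost server (is_localhost server)

-- ===== LEMMAS AND PROOFS =====

-- 'al ++ ['\\'] is a prefix of sl' ↔ some backslash position i of sl has sl[:i] = al
theorem prefix_backslash_iff (sl al : List Char) :
    (al ++ ['\\']) <+: sl ↔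
      ∃ i, i < sl.length ∧ sl.getD i ' ' = '\\' ∧ sl.take i = al := by
  constructor
  · rintro ⟨t, ht⟩
    refine ⟨al.length, ?_, ?_, ?_⟩
    · subst ht; simp
    · subst ht
      simp [List.getD]
    · subst ht
      simp
  · rintro ⟨i, hi, hc, htake⟩
    refine ⟨sl.drop (i + 1), ?_⟩
    rw [List.append_assoc]
    have hdrop : sl.drop i = sl[i] :: sl.drop (i + 1) :=
      List.drop_eq_getElem_cons hi
    have hget : sl[i] = '\\' := by
      have : sl.getD i ' ' = sl[i] := by simp [List.getD, List.getElem?_eq_getElem hi]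
      rw [this] at hc; exact hc
    calc al ++ '\\' :: sl.drop (i + 1)
        = sl.take i ++ sl.drop i := by rw [htake, hdrop, hget]
      _ = sl := List.take_append_drop i sl

-- sl ∈ NAMES ↔ some allowed name lowers to sl
theorem mem_nameSet_iff (sl : List Char) :
    PySem.Set.contains localhostNameSet sl = true ↔
      ∃ a ∈ allowedLocalhostNames, PySem.Chars.lower a.toList = sl := by
  simp [localhostNameSet, PySem.Set.mem_ofList]

theorem ports_agree (server : String) : is_localhost server = is_localhost_alt server := by
  unfold is_localhost is_localhost_alt
  by_cases h : server = ""
  · simp [h]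
  · simp only [h, if_false]
    set sl := PySem.Chars.strip (PySem.Chars.lower server.toList) with hsl
    by_cases hmem : PySem.Set.contains localhostNameSet sl = true
    · rw [hmem, if_pos rfl]
      rcases (mem_nameSet_iff sl).mp hmem with ⟨a, ha, heq⟩
      rw [List.any_eq_true]
      exact ⟨a, ha, by simp [heq]⟩
    · rw [Bool.not_eq_true] at hmem
      rw [hmem, if_neg (by simp)]
      rw [Bool.eq_iff_iff]
      simp only [List.any_eq_true, Bool.or_eq_true, beq_iff_eq, Bool.and_eq_true,
        List.mem_range, PySem.Chars.startswith_iff]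
      constructor
      · rintro ⟨a, ha, hcase⟩
        rcases hcase with heq | hpre
        · exact absurd ((mem_nameSet_iff sl).mpr ⟨a, ha, heq.symm⟩) (by rw [hmem]; simp)
        · rcases (prefix_backslash_iff sl _).mp hpre with ⟨i, hi, hc, ht⟩
          exact ⟨i, hi, by simpa [List.getD] using hc, (mem_nameSet_iff _).mpr ⟨a, ha, ht.symm⟩⟩
      · rintro ⟨i, hi, hc, hin⟩
        rcases (mem_nameSet_iff _).mp hin with ⟨a, ha, ht⟩
        refine ⟨a, ha, Or.inr ?_⟩
        exact (prefix_backslash_iff sl _).mpr ⟨i, hi, by simpa [List.getD] using hc, ht.symm⟩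

-- ===== VERDICT (by name: the statement is the Claim_ definition above) =====
theorem is_localhost_spec : Claim_equal_is_localhost := by
  intro server _
  exact ports_agree server
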